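-- pv_equiv track=rewrite | github.com/pypi-data/pypi-mirror-392 | packages/dataweave-py/dataweave_py-0.2.0.tar.gz/dataweave_py-0.2.0/dwpy/builtins.py | builtin_merge_with
-- ===== SOURCE A (Python) =====
-- from typing import Any, Callable, Dict, Iterable, List, Mapping, Optional, Sequence
--
-- def builtin_merge_with(source: Any, target: Any) -> Any:
--     if source is None:
--         return dict(target) if isinstance(target, Mapping) else target
--     if target is None:
--         return dict(source) if isinstance(source, Mapping) else source
--     if not isinstance(source, Mapping) or not isinstance(target, Mapping):
--         raise TypeError("mergeWith expects objects")
--     result = dict(source)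
--     for key in target.keys():
--         result.pop(key, None)
--     result.update(target)
--     return result
-- ===== SOURCE B (Python) =====
-- from typing import Any, Mapping
--
--
-- def _prepend_merge(items, target):
--     # recursion over the source items, building the result back-to-front:
--     # the base is dict(target); each source-only item is prepended in front.
--     if not items:
--         return dict(target)
--     (k, v), rest = items[0], items[1:]
--     merged = _prepend_merge(rest, target)
--     if k in target:
--         return merged
--     return {k: v, **merged}
--
--
-- def builtin_merge_with(source: Any, target: Any) -> Any:
--     if source is None:
--         return dict(target) if isinstance(target, Mapping) else target
--     if target is None:
--         return dict(source) if isinstance(source, Mapping) else source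
--     if not isinstance(source, Mapping) or not isinstance(target, Mapping):
--         raise TypeError("mergeWith expects objects")
--     return _prepend_merge(list(source.items()), target)
-- ===== Notes on version B (the rewrite author's own statement) =====
-- stated objective: alternative
-- what changed: Replaces A's imperative copy-the-source / pop-every-target-key / update mutation sequence by structural recursion over the source items that builds the result back-to-front, starting from dict(target) and prepending each source-only item in front of the partial result.
import Mathlib
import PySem

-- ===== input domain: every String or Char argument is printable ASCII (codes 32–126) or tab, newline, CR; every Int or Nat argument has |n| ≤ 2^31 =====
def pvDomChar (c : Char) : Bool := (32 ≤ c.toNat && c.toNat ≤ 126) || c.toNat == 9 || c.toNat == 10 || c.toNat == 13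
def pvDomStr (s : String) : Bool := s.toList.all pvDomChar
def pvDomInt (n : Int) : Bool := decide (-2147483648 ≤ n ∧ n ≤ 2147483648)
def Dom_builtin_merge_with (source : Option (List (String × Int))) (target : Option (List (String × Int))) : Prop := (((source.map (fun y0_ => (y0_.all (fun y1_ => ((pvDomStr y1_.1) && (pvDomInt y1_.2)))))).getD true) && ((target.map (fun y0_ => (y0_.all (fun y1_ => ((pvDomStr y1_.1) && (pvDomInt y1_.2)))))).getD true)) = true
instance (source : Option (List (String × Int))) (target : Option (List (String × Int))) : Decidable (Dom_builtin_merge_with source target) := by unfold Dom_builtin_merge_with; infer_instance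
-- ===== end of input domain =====

-- B rebuilds the merged dict by structural recursion over the source items, starting from
-- dict(target) and prepending each source-only item in front of the partial result,
-- instead of A's copy / pop-each-target-key / update mutation; objective: alternative.


-- ===== PORT A =====
def builtin_merge_with (source : Option (List (String × Int))) (target : Option (List (String × Int))) : Option (List (String × Int)) :=
  match source with
  | none =>
      -- if source is None: return dict(target) if isinstance(target, Mapping) else target
      match target with
      | none => none
      | some t => some (PySem.Dict.ofList t).items
  | some s =>
      match target with
      | none =>
          -- if target is None: return dict(source) if isinstance(source, Mapping) else source
          some (PySem.Dict.ofList s).items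
      | some t =>
          -- (the TypeError branch is unreachable: both arguments are dicts here)
          let td := PySem.Dict.ofList t
          let result := PySem.Dict.ofList s                          -- result = dict(source)
          let result := td.keys.foldl (fun r k => r.erase k) result  -- for key in target.keys(): result.pop(key, None)
          let result := result.update td.items                       -- result.update(target)
          some result.items

-- ===== PORT B =====
-- _prepend_merge(items, target): recursion over the source items building the result
-- back-to-front, base dict(target), prepending each source-only item ({k: v, **merged})
def pvPrependMerge (items : List (String × Int)) (td : PySem.Dict String Int) : PySem.Dict String Int :=
  match items with
  | [] => td
  | (k, v) :: rest =>
      let merged := pvPrependMerge rest td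
      if td.contains k then merged
      else PySem.Dict.ofList ((k, v) :: merged.items)   -- {k: v, **merged}

def builtin_merge_with_alt (source : Option (List (String × Int))) (target : Option (List (String × Int))) : Option (List (String × Int)) :=
  match source with
  | none =>
      match target with
      | none => none
      | some t => some (PySem.Dict.ofList t).items
  | some s =>
      match target with
      | none => some (PySem.Dict.ofList s).items
      | some t =>
          -- return _prepend_merge(list(source.items()), target)
          some (pvPrependMerge (PySem.Dict.ofList s).items (PySem.Dict.ofList t)).items

-- ===== PRECONDITION & SPEC =====
def Spec_builtin_merge_with (source : Option (List (String × Int))) (target : Option (List (String × Int))) (out : Option (List (String × Int))) : Prop := out = builtin_merge_with_alt source target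
instance (source : Option (List (String × Int))) (target : Option (List (String × Int))) (out : Option (List (String × Int))) : Decidable (Spec_builtin_merge_with source target out) := by unfold Spec_builtin_merge_with; infer_instance

-- ===== CLAIM (what is proved, stated in full; the proofs are below) =====
def Claim_equal_builtin_merge_with : Prop := ∀ (source : Option (List (String × Int))) (target : Option (List (String × Int))), Dom_builtin_merge_with source target → Spec_builtin_merge_with source target (builtin_merge_with source target)

-- ===== LEMMAS AND PROOFS =====

-- a list with pairwise-distinct keys round-trips through Dict.ofList unchanged
theorem ofList_items_of_nodup (l : List (String × Int)) (h : (l.map Prod.fst).Nodup) :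
    (PySem.Dict.ofList l).items = l := by
  have := PySem.Dict.items_foldl_insert_fresh l Prod.fst Prod.snd PySem.Dict.empty
      (fun a _ => PySem.Dict.contains_empty _) h
  simpa [PySem.Dict.ofList, PySem.Dict.update, PySem.Dict.empty] using this

-- erasing a list of keys = one filter keeping items whose key beats every erased key
theorem foldl_erase_items (ks : List String) (d : PySem.Dict String Int) :
    (ks.foldl (fun r k => r.erase k) d).items
      = d.items.filter (fun p => ks.all (fun k => !(p.1 == k))) := by
  induction ks generalizing d with
  | nil => simp
  | cons k ks ih =>
      rw [List.foldl_cons, ih]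
      simp only [PySem.Dict.erase, List.filter_filter, List.all_cons]
      exact List.filter_congr fun a _ => Bool.and_comm ..

-- the recursive back-to-front build produces: source-only items in order, then target's items
theorem prependMerge_items (items : List (String × Int)) (td : PySem.Dict String Int)
    (hnd : (items.map Prod.fst).Nodup) (htd : td.keys.Nodup) :
    (pvPrependMerge items td).items
      = items.filter (fun p => !(td.contains p.1)) ++ td.items := by
  induction items with
  | nil => simp [pvPrependMerge]
  | cons p rest ih =>
      obtain ⟨k, v⟩ := p
      simp only [List.map_cons, List.nodup_cons] at hnd
      have hrest := ih hnd.2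
      by_cases hc : td.contains k = true
      · simp [pvPrependMerge, hc, hrest]
      · have hcf : td.contains k = false := by simpa using hc
        have hknotin : k ∉ td.keys := by
          rw [PySem.Dict.contains_eq_decide_mem_keys] at hcf
          simpa using hcf
        have hkeys : (((k, v) :: (pvPrependMerge rest td).items).map Prod.fst).Nodup := by
          rw [List.map_cons, List.nodup_cons, hrest, List.map_append]
          constructor
          · intro hmem
            rcases List.mem_append.mp hmem with hmem | hmem
            · obtain ⟨q, hq, hqk⟩ := List.mem_map.mp hmem
              apply hnd.1
              have hqm : q.1 ∈ List.map Prod.fst rest :=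
                List.mem_map_of_mem (List.mem_of_mem_filter hq)
              rwa [hqk] at hqm
            · exact hknotin (by simpa [PySem.Dict.keys] using hmem)
          · refine List.Nodup.append ?_ (by simpa [PySem.Dict.keys] using htd) ?_
            · exact List.Nodup.sublist (List.filter_sublist.map Prod.fst) hnd.2
            · intro a ha hb
              obtain ⟨q, hq, hqa⟩ := List.mem_map.mp ha
              have := List.of_mem_filter hq
              rw [hqa] at this
              rw [PySem.Dict.contains_eq_decide_mem_keys] at this
              simp only [Bool.not_eq_true', decide_eq_false_iff_not] at this
              exact this (by simpa [PySem.Dict.keys] using hb)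
        simp only [pvPrependMerge, hcf]
        rw [if_neg (by decide : ¬(false = true))]
        rw [ofList_items_of_nodup _ hkeys, hrest]
        simp [hcf]

-- ===== VERDICT (by name: the statement is the Claim_ definition above) =====
theorem builtin_merge_with_spec : Claim_equal_builtin_merge_with := by
  intro source target _
  unfold Spec_builtin_merge_with builtin_merge_with builtin_merge_with_alt
  cases source with
  | none => cases target <;> rfl
  | some s =>
      cases target with
      | none => rfl
      | some t =>
          simp only
          congr 1
          set td := PySem.Dict.ofList t with htd
          have hnds : ((PySem.Dict.ofList s).items.map Prod.fst).Nodup := by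
            simpa [PySem.Dict.keys] using PySem.Dict.nodup_keys_ofList (κ := String) (ν := Int) s
          have hndt : td.keys.Nodup := PySem.Dict.nodup_keys_ofList t
          rw [prependMerge_items _ _ hnds hndt]
          -- A's side: erase all target keys, then update appends target's items
          have hfresh : ∀ p ∈ td.items,
              (td.keys.foldl (fun r k => r.erase k) (PySem.Dict.ofList s)).contains p.1 = false := by
            intro p hp
            rw [PySem.Dict.contains_eq_decide_mem_keys]
            simp only [decide_eq_false_iff_not, PySem.Dict.keys, foldl_erase_items]
            intro hmem
            obtain ⟨q, hq, hqp⟩ := List.mem_map.mp hmem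
            have hall := List.of_mem_filter hq
            rw [List.all_eq_true] at hall
            have := hall p.1 (List.mem_map_of_mem hp)
            simp [hqp] at this
          have hupd := PySem.Dict.items_foldl_insert_fresh td.items Prod.fst Prod.snd
              (td.keys.foldl (fun r k => r.erase k) (PySem.Dict.ofList s)) hfresh
              (by simpa [PySem.Dict.keys] using hndt)
          simp only [PySem.Dict.update]
          rw [hupd, foldl_erase_items]
          congr 1
          · apply List.filter_congr
            intro p _
            simp only [PySem.Dict.keys, PySem.Dict.contains, List.all_eq_not_any_not, Bool.not_not]
            congr 1
            rw [List.any_map]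
            exact List.any_congr rfl (fun q => Bool.beq_comm)
          · simp
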